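-- pv_equiv track=rewrite | github.com/cvvcvccvvcvc/gaph | pipeline/run_compaction.py | classify_terms
-- ===== SOURCE A (Python) =====
-- IMPACT_RANK = {"MODIFIER": 0, "LOW": 1, "MODERATE": 2, "HIGH": 3, "OTHER": -1}
--
-- TERM_TO_IMPACT = {
--     "frameshift_variant": "HIGH",
--     "stop_gained": "HIGH",
--     "stop_lost": "HIGH",
--     "start_lost": "HIGH",
--     "splice_acceptor_variant": "HIGH",
--     "splice_donor_variant": "HIGH",
--     "missense_variant": "MODERATE",
--     "inframe_insertion": "MODERATE",
--     "inframe_deletion": "MODERATE",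
--     "protein_altering_variant": "MODERATE",
--     "splice_region_variant": "MODERATE",
--     "synonymous_variant": "LOW",
--     "intron_variant": "MODIFIER",
--     "5_prime_utr_variant": "MODIFIER",
--     "3_prime_utr_variant": "MODIFIER",
--     "upstream_gene_variant": "MODIFIER",
--     "downstream_gene_variant": "MODIFIER",
--     "intergenic_variant": "MODIFIER",
--     "regulatory_region_variant": "MODIFIER",
--     "non_coding_transcript_variant": "MODIFIER",
--     "coding_sequence_variant": "MODIFIER",
--     "mature_mirna_variant": "MODIFIER",
-- }
--
-- def classify_terms(terms: list[str]) -> str | None: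
--     if not terms:
--         return None
--     best = "OTHER"
--     best_rank = IMPACT_RANK[best]
--     for term in terms:
--         impact = TERM_TO_IMPACT.get(term, "OTHER")
--         rank = IMPACT_RANK[impact]
--         if rank > best_rank:
--             best = impact
--             best_rank = rank
--     return best
-- ===== SOURCE B (Python) =====
-- TERM_TO_IMPACT = {
--     "frameshift_variant": "HIGH",
--     "stop_gained": "HIGH",
--     "stop_lost": "HIGH",
--     "start_lost": "HIGH",
--     "splice_acceptor_variant": "HIGH",
--     "splice_donor_variant": "HIGH",
--     "missense_variant": "MODERATE",
--     "inframe_insertion": "MODERATE",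
--     "inframe_deletion": "MODERATE",
--     "protein_altering_variant": "MODERATE",
--     "splice_region_variant": "MODERATE",
--     "synonymous_variant": "LOW",
--     "intron_variant": "MODIFIER",
--     "5_prime_utr_variant": "MODIFIER",
--     "3_prime_utr_variant": "MODIFIER",
--     "upstream_gene_variant": "MODIFIER",
--     "downstream_gene_variant": "MODIFIER",
--     "intergenic_variant": "MODIFIER",
--     "regulatory_region_variant": "MODIFIER",
--     "non_coding_transcript_variant": "MODIFIER",
--     "coding_sequence_variant": "MODIFIER",
--     "mature_mirna_variant": "MODIFIER",
-- }
--
-- def classify_terms(terms: list[str]) -> str | None: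
--     if not terms:
--         return None
--     impacts = {TERM_TO_IMPACT.get(t, "OTHER") for t in terms}
--     for level in ("HIGH", "MODERATE", "LOW", "MODIFIER"):
--         if level in impacts:
--             return level
--     return "OTHER"
-- ===== Notes on version B (the rewrite author's own statement) =====
-- stated objective: simpler
-- what changed: Replaces the running-max scan over terms (tracking best impact and its numeric rank via IMPACT_RANK) with a build-the-set-of-present-impacts pass followed by a probe of the fixed priority ladder HIGH/MODERATE/LOW/MODIFIER, returning the first level present and OTHER otherwise; no rank arithmetic at all.
import Mathlib
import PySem

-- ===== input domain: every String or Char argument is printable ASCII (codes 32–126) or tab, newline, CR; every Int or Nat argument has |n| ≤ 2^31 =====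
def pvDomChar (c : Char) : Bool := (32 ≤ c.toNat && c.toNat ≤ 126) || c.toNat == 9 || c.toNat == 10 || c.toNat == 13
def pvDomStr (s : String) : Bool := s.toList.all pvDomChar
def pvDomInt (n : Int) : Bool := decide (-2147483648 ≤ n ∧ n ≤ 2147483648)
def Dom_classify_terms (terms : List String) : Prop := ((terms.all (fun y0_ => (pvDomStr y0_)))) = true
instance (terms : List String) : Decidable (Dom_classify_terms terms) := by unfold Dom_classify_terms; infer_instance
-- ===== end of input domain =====

-- B replaces A's running-max-by-rank scan by building the set of present impact labels
-- and probing the fixed priority ladder; same return value, no speed claim (objective: simpler).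

-- ===== PORT A =====
def pvIMPACT_RANK : PySem.Dict String Int :=
  PySem.Dict.ofList [("MODIFIER", 0), ("LOW", 1), ("MODERATE", 2), ("HIGH", 3), ("OTHER", -1)]

def pvTERM_TO_IMPACT : PySem.Dict String String :=
  PySem.Dict.ofList [
    ("frameshift_variant", "HIGH"),
    ("stop_gained", "HIGH"),
    ("stop_lost", "HIGH"),
    ("start_lost", "HIGH"),
    ("splice_acceptor_variant", "HIGH"),
    ("splice_donor_variant", "HIGH"),
    ("missense_variant", "MODERATE"),
    ("inframe_insertion", "MODERATE"),
    ("inframe_deletion", "MODERATE"),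
    ("protein_altering_variant", "MODERATE"),
    ("splice_region_variant", "MODERATE"),
    ("synonymous_variant", "LOW"),
    ("intron_variant", "MODIFIER"),
    ("5_prime_utr_variant", "MODIFIER"),
    ("3_prime_utr_variant", "MODIFIER"),
    ("upstream_gene_variant", "MODIFIER"),
    ("downstream_gene_variant", "MODIFIER"),
    ("intergenic_variant", "MODIFIER"),
    ("regulatory_region_variant", "MODIFIER"),
    ("non_coding_transcript_variant", "MODIFIER"),
    ("coding_sequence_variant", "MODIFIER"),
    ("mature_mirna_variant", "MODIFIER")]

-- IMPACT_RANK[…] is indexed only at keys that are values of TERM_TO_IMPACT or "OTHER",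
-- all present in IMPACT_RANK, so the KeyError branch is unreachable; getD with default 0 is exact here.
def classify_terms (terms : List String) : Option String :=
  if terms = [] then none
  else
    let best := "OTHER"
    let best_rank := pvIMPACT_RANK.getD best 0
    let st := terms.foldl (fun (st : String × Int) term =>
      let impact := pvTERM_TO_IMPACT.getD term "OTHER"
      let rank := pvIMPACT_RANK.getD impact 0
      if rank > st.2 then (impact, rank) else st) (best, best_rank)
    some st.1

-- ===== PORT B =====
def classify_terms_alt (terms : List String) : Option String :=
  if terms = [] then none
  else
    let impacts : PySem.Set String :=
      PySem.Set.ofList (terms.map (fun t => pvTERM_TO_IMPACT.getD t "OTHER"))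
    match ["HIGH", "MODERATE", "LOW", "MODIFIER"].find?
        (fun level => PySem.Set.contains impacts level) with
    | some level => some level
    | none => some "OTHER"

-- ===== PRECONDITION & SPEC =====
def Spec_classify_terms (terms : List String) (out : Option String) : Prop := out = classify_terms_alt terms
instance (terms : List String) (out : Option String) : Decidable (Spec_classify_terms terms out) := by unfold Spec_classify_terms; infer_instance

-- ===== CLAIM (what is proved, stated in full; the proofs are below) =====
def Claim_equal_classify_terms : Prop := ∀ (terms : List String), Dom_classify_terms terms → Spec_classify_terms terms (classify_terms terms)

-- ===== LEMMAS AND PROOFS =====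

/-- The five possible impact labels. -/
def pvL5 : List String := ["HIGH", "MODERATE", "LOW", "MODIFIER", "OTHER"]

def pvImp (t : String) : String := pvTERM_TO_IMPACT.getD t "OTHER"

def pvRank (s : String) : Int := pvIMPACT_RANK.getD s 0

def pvMx (a x : String) : String := if pvRank x > pvRank a then x else a

/-- Highest-priority label present in `ls` (else "OTHER"). -/
def pvP (ls : List String) : String :=
  if "HIGH" ∈ ls then "HIGH"
  else if "MODERATE" ∈ ls then "MODERATE"
  else if "LOW" ∈ ls then "LOW"
  else if "MODIFIER" ∈ ls then "MODIFIER"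
  else "OTHER"

set_option maxHeartbeats 1000000 in
theorem pvImp_mem (t : String) : pvImp t ∈ pvL5 := by
  have hd : pvTERM_TO_IMPACT = PySem.Dict.mk [
      ("frameshift_variant", "HIGH"), ("stop_gained", "HIGH"), ("stop_lost", "HIGH"),
      ("start_lost", "HIGH"), ("splice_acceptor_variant", "HIGH"), ("splice_donor_variant", "HIGH"),
      ("missense_variant", "MODERATE"), ("inframe_insertion", "MODERATE"),
      ("inframe_deletion", "MODERATE"), ("protein_altering_variant", "MODERATE"),
      ("splice_region_variant", "MODERATE"), ("synonymous_variant", "LOW"),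
      ("intron_variant", "MODIFIER"), ("5_prime_utr_variant", "MODIFIER"),
      ("3_prime_utr_variant", "MODIFIER"), ("upstream_gene_variant", "MODIFIER"),
      ("downstream_gene_variant", "MODIFIER"), ("intergenic_variant", "MODIFIER"),
      ("regulatory_region_variant", "MODIFIER"), ("non_coding_transcript_variant", "MODIFIER"),
      ("coding_sequence_variant", "MODIFIER"), ("mature_mirna_variant", "MODIFIER")] := by rfl
  have gen : ∀ (its : List (String × String)), (∀ p ∈ its, p.2 ∈ pvL5) →
      (((PySem.Dict.mk its).get? t).getD "OTHER") ∈ pvL5 := by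
    intro its
    induction its with
    | nil => intro _; simp [PySem.Dict.get?, pvL5]
    | cons p rest ih =>
      intro hmem
      rw [show PySem.Dict.mk (p :: rest) = PySem.Dict.mk ((p.1, p.2) :: rest) from rfl,
          PySem.Dict.get?_mk_cons]
      by_cases hk : p.1 == t
      · simp only [hk, if_pos]; exact hmem p List.mem_cons_self
      · simp only [hk, Bool.false_eq_true, if_neg, not_false_iff]
        exact ih (fun q hq => hmem q (List.mem_cons_of_mem _ hq))
  unfold pvImp
  rw [hd, show PySem.Dict.getD (PySem.Dict.mk _) t "OTHER"
      = ((PySem.Dict.mk _).get? t).getD "OTHER" from PySem.Dict.getD_eq_get?_getD ..]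
  exact gen _ (by decide)

theorem pvP_mem (ls : List String) : pvP ls ∈ pvL5 := by
  unfold pvP; split_ifs <;> simp [pvL5]

theorem pvMx_mem {a x : String} (ha : a ∈ pvL5) (hx : x ∈ pvL5) : pvMx a x ∈ pvL5 := by
  unfold pvMx; split_ifs <;> assumption

theorem pvMx_assoc : ∀ a ∈ pvL5, ∀ x ∈ pvL5, ∀ y ∈ pvL5,
    pvMx (pvMx a x) y = pvMx a (pvMx y x) := by decide

theorem pvMx_other : ∀ y ∈ pvL5, pvMx "OTHER" y = y := by decide

theorem pvP_cons (x : String) (hx : x ∈ pvL5) (ls : List String) :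
    pvP (x :: ls) = pvMx (pvP ls) x := by
  fin_cases hx <;>
    (unfold pvP <;>
     by_cases h1 : "HIGH" ∈ ls <;> by_cases h2 : "MODERATE" ∈ ls <;>
     by_cases h3 : "LOW" ∈ ls <;> by_cases h4 : "MODIFIER" ∈ ls <;>
     simp_all [List.mem_cons, pvMx, pvRank] <;> decide)

/-- A's fold, with the rank component carried along, computes `pvMx`-fold on labels. -/
theorem fold_pair (ts : List String) : ∀ b : String,
    ts.foldl (fun (st : String × Int) term =>
      let impact := pvTERM_TO_IMPACT.getD term "OTHER"
      let rank := pvIMPACT_RANK.getD impact 0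
      if rank > st.2 then (impact, rank) else st) (b, pvRank b)
    = (ts.foldl (fun a t => pvMx a (pvImp t)) b,
       pvRank (ts.foldl (fun a t => pvMx a (pvImp t)) b)) := by
  induction ts with
  | nil => intro b; rfl
  | cons t ts ih =>
    intro b
    simp only [List.foldl_cons]
    rw [show (if pvIMPACT_RANK.getD (pvTERM_TO_IMPACT.getD t "OTHER") 0 > (b, pvRank b).2
        then (pvTERM_TO_IMPACT.getD t "OTHER", pvIMPACT_RANK.getD (pvTERM_TO_IMPACT.getD t "OTHER") 0)
        else (b, pvRank b)) = (pvMx b (pvImp t), pvRank (pvMx b (pvImp t))) from by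
      unfold pvMx pvImp pvRank; split_ifs <;> simp_all]
    exact ih (pvMx b (pvImp t))

/-- The `pvMx` fold over labels equals `pvMx` of the accumulator with the priority probe. -/
theorem fold_mx (ls : List String) : ∀ b ∈ pvL5, (∀ x ∈ ls, x ∈ pvL5) →
    ls.foldl pvMx b = pvMx b (pvP ls) := by
  induction ls with
  | nil =>
    intro b hb _
    have : ∀ b ∈ pvL5, pvMx b "OTHER" = b := by decide
    simp [pvP, this b hb]
  | cons x ls ih =>
    intro b hb hmem
    have hx : x ∈ pvL5 := hmem x (List.mem_cons_self)
    have hls : ∀ y ∈ ls, y ∈ pvL5 := fun y hy => hmem y (List.mem_cons_of_mem _ hy)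
    simp only [List.foldl_cons]
    rw [ih (pvMx b x) (pvMx_mem hb hx) hls, pvP_cons x hx ls,
        pvMx_assoc b hb x hx (pvP ls) (pvP_mem ls)]

theorem imp_fold_eq (ts : List String) (b : String) :
    ts.foldl (fun a t => pvMx a (pvImp t)) b = (ts.map pvImp).foldl pvMx b := by
  rw [List.foldl_map]

theorem find_eq_pvP (ls : List String) :
    (match ["HIGH", "MODERATE", "LOW", "MODIFIER"].find?
        (fun level => PySem.Set.contains (PySem.Set.ofList ls) level) with
      | some level => some level
      | none => some "OTHER") = some (pvP ls) := by
  have hmem : ∀ y : String, (PySem.Set.contains (PySem.Set.ofList ls) y = true) ↔ y ∈ ls := by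
    intro y; rw [PySem.Set.contains_iff, PySem.Set.mem_ofList]
  simp only [List.find?]
  by_cases h1 : "HIGH" ∈ ls <;> by_cases h2 : "MODERATE" ∈ ls <;>
    by_cases h3 : "LOW" ∈ ls <;> by_cases h4 : "MODIFIER" ∈ ls <;>
    simp_all [pvP]

-- ===== VERDICT (by name: the statement is the Claim_ definition above) =====
theorem classify_terms_spec : Claim_equal_classify_terms := by
  intro terms _
  unfold Spec_classify_terms classify_terms classify_terms_alt
  by_cases h : terms = []
  · simp [h]
  · rw [if_neg h, if_neg h]
    show some ((terms.foldl (fun (st : String × Int) term =>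
        let impact := pvTERM_TO_IMPACT.getD term "OTHER"
        let rank := pvIMPACT_RANK.getD impact 0
        if rank > st.2 then (impact, rank) else st) ("OTHER", pvRank "OTHER")).1)
      = match ["HIGH", "MODERATE", "LOW", "MODIFIER"].find?
            (fun level => PySem.Set.contains (PySem.Set.ofList (terms.map pvImp)) level) with
        | some level => some level
        | none => some "OTHER"
    rw [fold_pair terms "OTHER", imp_fold_eq,
        fold_mx (terms.map pvImp) "OTHER" (by decide)
          (by intro x hx; rcases List.mem_map.mp hx with ⟨t, _, rfl⟩; exact pvImp_mem t)]
    rw [pvMx_other (pvP (terms.map pvImp)) (pvP_mem _)]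
    exact (find_eq_pvP (terms.map pvImp)).symm
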